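-- pv_equiv track=rewrite | github.com/mling13/CSE599b | rna_inverse.py | check_sequence_constraints
-- ===== SOURCE A (Python) =====
-- def structure_to_bp(structure):
--     """
--     Converts dot parens structure to dictionary of base pairs
--
--     Args:
--         structure (str): dot-parens structure notation
--
--     Returns:
--         bp (dict): dictionary of base pair indices
--     """
--     open_parens = [] # List of open parentheses
--     bp = {} # Dict of base pairs
--     for i, x in enumerate(structure):
--         if x == '(':
--             open_parens.append(i)
--         elif x == ')':
--             open_index = open_parens.pop()
--             bp[open_index] = i
--             bp[i] = open_index
--     return bp
--
-- def check_sequence_constraints(structure, constraints):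
--     """
--     Checks the primary sequence constraints given by the user,
--     converts user constraints to full list of constraints
--
--     Args:
--         structure (str): desired dot-parens structure notation
--         constraints (dict): primary constraints {pos: base} form
--             e.g. constraints[12] = 'A'
--
--     Returns:
--         new_constraints (dict): primary constraints converted
--             to account for base pairing
--     """
--     new_constraints = constraints.copy()
--     bases = ['A', 'G', 'U', 'C']
--     pairs = {'A':'U', 'G':'C', 'U':'A', 'C':'G'}
--     bp = structure_to_bp(structure)
--     for position in constraints.keys():
--         if position in bp:
--             bp_position = bp[position]
--             old_base = constraints[position]
--             new_constraints[bp_position] = pairs[old_base]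
--     return new_constraints
-- ===== SOURCE B (Python) =====
-- def _partner(structure, i):
--     """Index of the base paired with position i, found by direct depth
--     counting from i (rightward for '(', leftward for ')'); None if unpaired."""
--     n = len(structure)
--     if i < 0 or i >= n:
--         return None
--     c = structure[i]
--     if c == '(':
--         depth = 1
--         for j in range(i + 1, n):
--             if structure[j] == '(':
--                 depth += 1
--             elif structure[j] == ')':
--                 depth -= 1
--                 if depth == 0:
--                     return j
--         return None
--     if c == ')':
--         depth = 1
--         for j in range(i - 1, -1, -1):
--             if structure[j] == ')':
--                 depth += 1
--             elif structure[j] == '(':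
--                 depth -= 1
--                 if depth == 0:
--                     return j
--         return None
--     return None
--
-- def check_sequence_constraints(structure, constraints):
--     pairs = {'A': 'U', 'G': 'C', 'U': 'A', 'C': 'G'}
--     new_constraints = dict(constraints)
--     for position, base in constraints.items():
--         p = _partner(structure, position)
--         if p is not None:
--             new_constraints[p] = pairs[base]
--     return new_constraints
-- ===== Notes on version B (the rewrite author's own statement) =====
-- stated objective: alternative
-- what changed: A builds a global base-pair dictionary with a stack over the whole structure and then loops over the constraints; B has no stack and no pair table: for each constrained position it finds the partner directly by a bidirectional depth-counting scan from that position.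
-- outside the precondition, e.g. on check_sequence_constraints('(', {0: 'X'}): A returns {0: 'X'}, B returns {0: 'X'}
import Mathlib
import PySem

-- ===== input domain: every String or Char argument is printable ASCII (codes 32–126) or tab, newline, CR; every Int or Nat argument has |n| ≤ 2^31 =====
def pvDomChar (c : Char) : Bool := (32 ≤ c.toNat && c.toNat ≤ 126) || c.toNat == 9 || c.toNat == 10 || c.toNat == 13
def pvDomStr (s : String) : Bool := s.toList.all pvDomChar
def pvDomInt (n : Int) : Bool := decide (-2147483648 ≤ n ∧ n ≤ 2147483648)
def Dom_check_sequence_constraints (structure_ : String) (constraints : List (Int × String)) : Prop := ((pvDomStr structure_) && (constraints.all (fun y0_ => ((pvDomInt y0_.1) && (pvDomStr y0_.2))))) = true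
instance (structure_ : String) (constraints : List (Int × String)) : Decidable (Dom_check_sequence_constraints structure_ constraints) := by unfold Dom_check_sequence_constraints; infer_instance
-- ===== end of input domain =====

-- B drops A's global stack-built base-pair dictionary and instead finds each constrained
-- position's partner by a direct bidirectional depth-counting scan (objective: alternative
-- decomposition; no speed claim). Return-value equivalence on Pre_ is proved below.

-- ===== PORT A =====
-- one step of structure_to_bp's loop over enumerate(structure); state none = IndexError raised
def pvStepBP (st : Option (List Int × PySem.Dict Int Int)) (p : Int × Char) :
    Option (List Int × PySem.Dict Int Int) :=
  match st with
  | none => none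
  | some (open_parens, bp) =>
    if p.2 = '(' then some (open_parens ++ [p.1], bp)
    else if p.2 = ')' then
      match open_parens.getLast? with          -- open_parens.pop()
      | none => none                           -- IndexError (outside Pre_)
      | some oi => some (open_parens.dropLast, (bp.insert oi p.1).insert p.1 oi)
    else some (open_parens, bp)

def structure_to_bp (structure_ : String) : Option (PySem.Dict Int Int) :=
  ((PySem.List.enumerate structure_.toList 0).foldl pvStepBP
    (some ([], PySem.Dict.empty))).map (·.2)

-- body of A's `for position in constraints.keys()` loop; iterating the dict's items gives
-- position = kv.1 and old_base = constraints[position] = kv.2; acc none = KeyError raised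
def pvPropA (bp : PySem.Dict Int Int) (pairs : PySem.Dict String String)
    (acc : Option (PySem.Dict Int String)) (kv : Int × String) :
    Option (PySem.Dict Int String) :=
  match acc with
  | none => none
  | some nc =>
    match bp.get? kv.1 with                    -- if position in bp
    | none => some nc
    | some bpp =>
      match pairs.get? kv.2 with               -- pairs[old_base]
      | none => none                           -- KeyError (outside Pre_)
      | some pb => some (nc.insert bpp pb)

def check_sequence_constraints (structure_ : String) (constraints : List (Int × String)) :
    List (Int × String) :=
  let pairs : PySem.Dict String String :=
    PySem.Dict.ofList [("A","U"),("G","C"),("U","A"),("C","G")]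
  match structure_to_bp structure_ with
  | none => []                                 -- IndexError propagates (outside Pre_)
  | some bp =>
    match (PySem.Dict.ofList constraints).items.foldl (pvPropA bp pairs)
        (some (PySem.Dict.ofList constraints)) with   -- constraints.copy()
    | none => []                               -- KeyError propagates (outside Pre_)
    | some nc => nc.items

-- ===== PORT B =====
-- rightward scan of B's _partner: `for j in range(i+1, n)` with a depth counter
def pvScanR : List Char → Int → Int → Option Int
  | [], _, _ => none
  | c :: rest, j, d =>
    if c = '(' then pvScanR rest (j+1) (d+1)
    else if c = ')' then (if d - 1 = 0 then some j else pvScanR rest (j+1) (d-1))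
    else pvScanR rest (j+1) d

-- leftward scan of B's _partner: `for j in range(i-1, -1, -1)` (prefix reversed, index decreasing)
def pvScanL : List Char → Int → Int → Option Int
  | [], _, _ => none
  | c :: rest, j, d =>
    if c = ')' then pvScanL rest (j-1) (d+1)
    else if c = '(' then (if d - 1 = 0 then some j else pvScanL rest (j-1) (d-1))
    else pvScanL rest (j-1) d

def pvPartner (l : List Char) (i : Int) : Option Int :=
  if i < 0 ∨ (l.length : Int) ≤ i then none
  else
    match l[i.toNat]? with
    | none => none
    | some c =>
      if c = '(' then pvScanR (l.drop (i.toNat + 1)) (i + 1) 1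
      else if c = ')' then pvScanL ((l.take i.toNat).reverse) (i - 1) 1
      else none

-- body of B's `for position, base in constraints.items()` loop; acc none = KeyError raised
def pvPropB (l : List Char) (pairs : PySem.Dict String String)
    (acc : Option (PySem.Dict Int String)) (kv : Int × String) :
    Option (PySem.Dict Int String) :=
  match acc with
  | none => none
  | some nc =>
    match pvPartner l kv.1 with
    | none => some nc
    | some p =>
      match pairs.get? kv.2 with               -- pairs[base]
      | none => none                           -- KeyError (outside Pre_)
      | some pb => some (nc.insert p pb)

def check_sequence_constraints_alt (structure_ : String) (constraints : List (Int × String)) :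
    List (Int × String) :=
  let pairs : PySem.Dict String String :=
    PySem.Dict.ofList [("A","U"),("G","C"),("U","A"),("C","G")]
  match (PySem.Dict.ofList constraints).items.foldl (pvPropB structure_.toList pairs)
      (some (PySem.Dict.ofList constraints)) with     -- dict(constraints)
  | none => []                                 -- KeyError propagates (outside Pre_)
  | some nc => nc.items

-- ===== PRECONDITION & SPEC =====
-- Pre_ excludes (1) structures where some prefix has more ')' than '(' — there A's pop() raises
-- IndexError — and (2) constraints whose base at a parenthesis position is not one of A/G/U/C —
-- there A raises KeyError whenever that position is paired; for an UNMATCHED '(' position A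
-- returns normally and B returns the same value, so (2) is slightly wider than A's crash set
-- (such an excluded input is cited in the claim).
def Pre_check_sequence_constraints (structure_ : String) (constraints : List (Int × String)) : Prop :=
  (∀ k : Nat, k ≤ structure_.toList.length →
      (structure_.toList.take k).count ')' ≤ (structure_.toList.take k).count '(')
  ∧ (∀ kv ∈ constraints,
      (0 ≤ kv.1 ∧ (structure_.toList[kv.1.toNat]? = some '(' ∨
                   structure_.toList[kv.1.toNat]? = some ')')) →
      kv.2 ∈ (["A", "G", "U", "C"] : List String))
instance (structure_ : String) (constraints : List (Int × String)) :
    Decidable (Pre_check_sequence_constraints structure_ constraints) := by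
  unfold Pre_check_sequence_constraints; infer_instance

def pvWitness_check_sequence_constraints : String × (List (Int × String)) :=
  ("((.))", [(0, "A"), (2, "C"), (3, "G"), (9, "X")])

def Spec_check_sequence_constraints (structure_ : String) (constraints : List (Int × String)) (out : List (Int × String)) : Prop := out = check_sequence_constraints_alt structure_ constraints
instance (structure_ : String) (constraints : List (Int × String)) (out : List (Int × String)) : Decidable (Spec_check_sequence_constraints structure_ constraints out) := by unfold Spec_check_sequence_constraints; infer_instance

-- ===== CLAIM (what is proved, stated in full; the proofs are below) =====
def Claim_equal_check_sequence_constraints : Prop := ∀ (structure_ : String) (constraints : List (Int × String)), Dom_check_sequence_constraints structure_ constraints → Pre_check_sequence_constraints structure_ constraints → Spec_check_sequence_constraints structure_ constraints (check_sequence_constraints structure_ constraints)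

-- ===== LEMMAS AND PROOFS =====

theorem pv_witness_ok :
    Dom_check_sequence_constraints pvWitness_check_sequence_constraints.1 pvWitness_check_sequence_constraints.2 ∧
    Pre_check_sequence_constraints pvWitness_check_sequence_constraints.1 pvWitness_check_sequence_constraints.2 := by
  constructor <;> decide

def pvW (t : List Char) : Int := (t.count '(' : Int) - (t.count ')' : Int)
theorem pvW_nil : pvW [] = 0 := by simp [pvW]
theorem pvW_cons (c : Char) (t : List Char) :
    pvW (c :: t) = (if c = '(' then 1 else if c = ')' then -1 else 0) + pvW t := by
  simp only [pvW, List.count_cons]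
  split_ifs with h1 h2 <;> simp_all <;> push_cast <;> ring
theorem pvW_append (a b : List Char) : pvW (a ++ b) = pvW a + pvW b := by
  simp [pvW, List.count_append]; ring
theorem pvW_reverse (a : List Char) : pvW a.reverse = pvW a := by
  simp [pvW, List.count_reverse]

def pvB (l : List Char) (j : Nat) : Int := pvW (l.take j)

theorem pvB_zero (l : List Char) : pvB l 0 = 0 := by simp [pvB, pvW_nil]

theorem pvB_succ (l : List Char) (j : Nat) (c : Char) (h : l[j]? = some c) :
    pvB l (j+1) = pvB l j + (if c = '(' then 1 else if c = ')' then -1 else 0) := by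
  rw [pvB, pvB, List.take_add_one, pvW_append, h]
  simp only [Option.toList_some]
  rw [pvW_cons, pvW_nil]; ring

theorem pvW_dropTake (l : List Char) (a k : Nat) :
    pvW ((l.drop a).take k) = pvB l (a + k) - pvB l a := by
  rw [pvB, pvB, List.take_add, pvW_append]; ring

theorem pvW_revTake (l : List Char) (c k : Nat) (hc : c ≤ l.length) (hk : k ≤ c) :
    pvW (((l.take c).reverse).take k) = pvB l c - pvB l (c - k) := by
  rw [List.take_reverse, pvW_reverse, List.length_take, min_eq_left hc]
  have : pvW ((l.take c).take (c - k)) + pvW ((l.take c).drop (c - k)) = pvW (l.take c) := by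
    rw [← pvW_append, List.take_append_drop]
  rw [List.take_take, min_eq_left (by omega)] at this
  rw [pvB, pvB]; omega

def pvMatched (l : List Char) (o c : Nat) : Prop :=
  o < c ∧ c < l.length ∧ l[o]? = some '(' ∧ l[c]? = some ')' ∧
  pvB l (c+1) = pvB l o ∧ ∀ j : Nat, o < j → j ≤ c → pvB l o + 1 ≤ pvB l j

theorem pvScanR_eq_some_iff (t : List Char) (j d : Int) (hd : 1 ≤ d) (r : Int) :
    pvScanR t j d = some r ↔
      ∃ k : Nat, t[k]? = some ')' ∧ r = j + k ∧ d + pvW (t.take k) = 1 ∧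
        ∀ m : Nat, m ≤ k → 1 ≤ d + pvW (t.take m) := by
  induction t generalizing j d r with
  | nil => simp [pvScanR]
  | cons c t' ih =>
    by_cases hc : c = '('
    · subst hc
      rw [pvScanR, if_pos rfl, ih (j+1) (d+1) (by omega)]
      constructor
      · rintro ⟨k, hk, hr, he, hm⟩
        refine ⟨k+1, by simpa using hk, by push_cast at hr ⊢; omega, ?_, ?_⟩
        · rw [List.take_succ_cons, pvW_cons]; simp; omega
        · intro m hm'
          cases m with
          | zero => simpa [pvW_nil] using hd
          | succ m' =>
            have := hm m' (by omega)
            rw [List.take_succ_cons, pvW_cons]; simp; omega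
      · rintro ⟨k, hk, hr, he, hm⟩
        cases k with
        | zero => simp at hk
        | succ k' =>
          rw [List.take_succ_cons, pvW_cons] at he
          simp at hk he
          refine ⟨k', hk, by push_cast at hr ⊢; omega, by omega, ?_⟩
          intro m hm'
          have := hm (m+1) (by omega)
          rw [List.take_succ_cons, pvW_cons] at this; simp at this; omega
    · by_cases hc2 : c = ')'
      · subst hc2
        rw [pvScanR, if_neg (by decide), if_pos rfl]
        by_cases hd1 : d - 1 = 0
        · rw [if_pos hd1]
          constructor
          · rintro ⟨rfl⟩
            exact ⟨0, by simp, by simp, by simp [pvW_nil]; omega, by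
              intro m hm; interval_cases m; simp [pvW_nil]; omega⟩
          · rintro ⟨k, hk, hr, he, hm⟩
            cases k with
            | zero => simp at hr ⊢; omega
            | succ k' =>
              have := hm 1 (by omega)
              rw [List.take_succ_cons, pvW_cons] at this
              simp [pvW_nil] at this; omega
        · rw [if_neg hd1, ih (j+1) (d-1) (by omega)]
          constructor
          · rintro ⟨k, hk, hr, he, hm⟩
            refine ⟨k+1, by simpa using hk, by push_cast at hr ⊢; omega, ?_, ?_⟩
            · rw [List.take_succ_cons, pvW_cons]; simp; omega
            · intro m hm'
              cases m with
              | zero => simpa [pvW_nil] using hd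
              | succ m' =>
                have := hm m' (by omega)
                rw [List.take_succ_cons, pvW_cons]; simp; omega
          · rintro ⟨k, hk, hr, he, hm⟩
            cases k with
            | zero =>
              simp [pvW_nil] at he; omega
            | succ k' =>
              rw [List.take_succ_cons, pvW_cons] at he
              simp at hk he
              refine ⟨k', hk, by push_cast at hr ⊢; omega, by omega, ?_⟩
              intro m hm'
              have := hm (m+1) (by omega)
              rw [List.take_succ_cons, pvW_cons] at this; simp at this; omega
      · rw [pvScanR, if_neg hc, if_neg hc2, ih (j+1) d hd]
        constructor
        · rintro ⟨k, hk, hr, he, hm⟩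
          refine ⟨k+1, by simpa using hk, by push_cast at hr ⊢; omega, ?_, ?_⟩
          · rw [List.take_succ_cons, pvW_cons, if_neg hc, if_neg hc2]; omega
          · intro m hm'
            cases m with
            | zero => simpa [pvW_nil] using hd
            | succ m' =>
              have := hm m' (by omega)
              rw [List.take_succ_cons, pvW_cons, if_neg hc, if_neg hc2]; omega
        · rintro ⟨k, hk, hr, he, hm⟩
          cases k with
          | zero => simp at hk; exact absurd hk hc2
          | succ k' =>
            rw [List.take_succ_cons, pvW_cons, if_neg hc, if_neg hc2] at he
            simp at hk
            refine ⟨k', hk, by push_cast at hr ⊢; omega, by omega, ?_⟩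
            intro m hm'
            have := hm (m+1) (by omega)
            rw [List.take_succ_cons, pvW_cons, if_neg hc, if_neg hc2] at this; omega

theorem pvScanL_eq_some_iff (t : List Char) (j d : Int) (hd : 1 ≤ d) (r : Int) :
    pvScanL t j d = some r ↔
      ∃ k : Nat, t[k]? = some '(' ∧ r = j - k ∧ d - pvW (t.take k) = 1 ∧
        ∀ m : Nat, m ≤ k → 1 ≤ d - pvW (t.take m) := by
  induction t generalizing j d r with
  | nil => simp [pvScanL]
  | cons c t' ih =>
    by_cases hc : c = ')'
    · subst hc
      rw [pvScanL, if_pos rfl, ih (j-1) (d+1) (by omega)]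
      constructor
      · rintro ⟨k, hk, hr, he, hm⟩
        refine ⟨k+1, by simpa using hk, by push_cast at hr ⊢; omega, ?_, ?_⟩
        · rw [List.take_succ_cons, pvW_cons]; simp; omega
        · intro m hm'
          cases m with
          | zero => simpa [pvW_nil] using hd
          | succ m' =>
            have := hm m' (by omega)
            rw [List.take_succ_cons, pvW_cons]; simp; omega
      · rintro ⟨k, hk, hr, he, hm⟩
        cases k with
        | zero => simp at hk
        | succ k' =>
          rw [List.take_succ_cons, pvW_cons] at he
          simp at hk he
          refine ⟨k', hk, by push_cast at hr ⊢; omega, by omega, ?_⟩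
          intro m hm'
          have := hm (m+1) (by omega)
          rw [List.take_succ_cons, pvW_cons] at this; simp at this; omega
    · by_cases hc2 : c = '('
      · subst hc2
        rw [pvScanL, if_neg (by decide), if_pos rfl]
        by_cases hd1 : d - 1 = 0
        · rw [if_pos hd1]
          constructor
          · rintro ⟨rfl⟩
            exact ⟨0, by simp, by simp, by simp [pvW_nil]; omega, by
              intro m hm; interval_cases m; simp [pvW_nil]; omega⟩
          · rintro ⟨k, hk, hr, he, hm⟩
            cases k with
            | zero => simp at hr ⊢; omega
            | succ k' =>
              have := hm 1 (by omega)
              rw [List.take_succ_cons, pvW_cons] at this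
              simp [pvW_nil] at this; omega
        · rw [if_neg hd1, ih (j-1) (d-1) (by omega)]
          constructor
          · rintro ⟨k, hk, hr, he, hm⟩
            refine ⟨k+1, by simpa using hk, by push_cast at hr ⊢; omega, ?_, ?_⟩
            · rw [List.take_succ_cons, pvW_cons]; simp; omega
            · intro m hm'
              cases m with
              | zero => simpa [pvW_nil] using hd
              | succ m' =>
                have := hm m' (by omega)
                rw [List.take_succ_cons, pvW_cons]; simp; omega
          · rintro ⟨k, hk, hr, he, hm⟩
            cases k with
            | zero =>
              simp [pvW_nil] at he; omega
            | succ k' =>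
              rw [List.take_succ_cons, pvW_cons] at he
              simp at hk he
              refine ⟨k', hk, by push_cast at hr ⊢; omega, by omega, ?_⟩
              intro m hm'
              have := hm (m+1) (by omega)
              rw [List.take_succ_cons, pvW_cons] at this; simp at this; omega
      · rw [pvScanL, if_neg hc, if_neg hc2, ih (j-1) d hd]
        constructor
        · rintro ⟨k, hk, hr, he, hm⟩
          refine ⟨k+1, by simpa using hk, by push_cast at hr ⊢; omega, ?_, ?_⟩
          · rw [List.take_succ_cons, pvW_cons, if_neg hc2, if_neg hc]; omega
          · intro m hm'
            cases m with
            | zero => simpa [pvW_nil] using hd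
            | succ m' =>
              have := hm m' (by omega)
              rw [List.take_succ_cons, pvW_cons, if_neg hc2, if_neg hc]; omega
        · rintro ⟨k, hk, hr, he, hm⟩
          cases k with
          | zero => simp at hk; exact absurd hk hc2
          | succ k' =>
            rw [List.take_succ_cons, pvW_cons, if_neg hc2, if_neg hc] at he
            simp at hk
            refine ⟨k', hk, by push_cast at hr ⊢; omega, by omega, ?_⟩
            intro m hm'
            have := hm (m+1) (by omega)
            rw [List.take_succ_cons, pvW_cons, if_neg hc2, if_neg hc] at this; omega


theorem pvRevTake_getElem (l : List Char) (c k : Nat) (hcl : c ≤ l.length) (hk : k < c) :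
    ((l.take c).reverse)[k]? = l[c - 1 - k]? := by
  rw [List.getElem?_reverse (by rw [List.length_take]; omega)]
  rw [List.length_take, min_eq_left hcl, List.getElem?_take_of_lt (by omega)]

theorem pvPartner_open_iff (l : List Char) (o : Nat) (ho : l[o]? = some '(') (r : Int) :
    pvPartner l (o : Int) = some r ↔ ∃ c : Nat, r = (c : Int) ∧ pvMatched l o c := by
  have hol : o < l.length := (List.getElem?_eq_some_iff.mp ho).1
  have hB1 : pvB l (o+1) = pvB l o + 1 := by
    have := pvB_succ l o '(' ho; simpa using this
  unfold pvPartner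
  rw [if_neg (by push_cast; omega)]
  simp only [Int.toNat_natCast]
  rw [ho]
  simp only [reduceIte]
  rw [pvScanR_eq_some_iff _ _ _ (le_refl 1) r]
  constructor
  · rintro ⟨k, hk, hr, he, hm⟩
    rw [List.getElem?_drop] at hk
    have hck : o + 1 + k < l.length := (List.getElem?_eq_some_iff.mp hk).1
    rw [pvW_dropTake] at he
    have hsucc := pvB_succ l (o+1+k) ')' hk
    simp at hsucc
    refine ⟨o+1+k, by push_cast at hr ⊢; omega, by omega, hck, ho, hk, by omega, ?_⟩
    intro j hj1 hj2
    have := hm (j - (o+1)) (by omega)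
    rw [pvW_dropTake, show o+1+(j-(o+1)) = j by omega] at this
    omega
  · rintro ⟨c, rfl, hoc, hcl, _, hcc, hE, hA⟩
    have hsucc := pvB_succ l c ')' hcc
    simp at hsucc
    have hBc : pvB l c = pvB l o + 1 := by omega
    refine ⟨c - (o+1), ?_, by push_cast; omega, ?_, ?_⟩
    · rw [List.getElem?_drop, show o+1+(c-(o+1)) = c by omega]; exact hcc
    · rw [pvW_dropTake, show o+1+(c-(o+1)) = c by omega]; omega
    · intro m hm
      rw [pvW_dropTake]
      by_cases hm0 : m = 0
      · subst hm0; simp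
      · have := hA (o+1+m) (by omega) (by omega)
        omega

theorem pvPartner_close_iff (l : List Char) (c : Nat) (hcc : l[c]? = some ')') (r : Int) :
    pvPartner l (c : Int) = some r ↔ ∃ o : Nat, r = (o : Int) ∧ pvMatched l o c := by
  have hcl : c < l.length := (List.getElem?_eq_some_iff.mp hcc).1
  have hBc : pvB l (c+1) = pvB l c - 1 := by
    have := pvB_succ l c ')' hcc; simp at this; omega
  unfold pvPartner
  rw [if_neg (by push_cast; omega)]
  simp only [Int.toNat_natCast]
  rw [hcc]
  simp only [reduceIte]
  rw [if_neg (by decide)]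
  rw [pvScanL_eq_some_iff _ _ _ (le_refl 1) r]
  have htlen : ((l.take c).reverse).length = c := by
    rw [List.length_reverse, List.length_take, min_eq_left (by omega)]
  constructor
  · rintro ⟨k, hk, hr, he, hm⟩
    have hkc : k < c := by
      have := (List.getElem?_eq_some_iff.mp hk).1; omega
    rw [pvRevTake_getElem l c k (by omega) hkc] at hk
    rw [pvW_revTake l c k (by omega) (by omega)] at he
    set o := c - 1 - k with hodef
    have hko : c - k = o + 1 := by omega
    have hB1 : pvB l (o+1) = pvB l o + 1 := by
      have := pvB_succ l o '(' hk; simpa using this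
    rw [hko] at he
    refine ⟨o, by push_cast at hr ⊢; omega, by omega, hcl, hk, hcc, by omega, ?_⟩
    intro j hj1 hj2
    have := hm (c - j) (by omega)
    rw [pvW_revTake l c (c-j) (by omega) (by omega), show c - (c-j) = j by omega] at this
    omega
  · rintro ⟨o, rfl, hoc, _, ho, _, hE, hA⟩
    have hB1 : pvB l (o+1) = pvB l o + 1 := by
      have := pvB_succ l o '(' ho; simpa using this
    have hBcv : pvB l c = pvB l o + 1 := by
      rcases Nat.eq_or_lt_of_le (Nat.succ_le_of_lt hoc) with h | h
      · rw [← h]; omega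
      · have := hA c hoc (le_refl c); omega
    refine ⟨c - 1 - o, ?_, by push_cast; omega, ?_, ?_⟩
    · rw [pvRevTake_getElem l c (c-1-o) (by omega) (by omega),
        show c - 1 - (c-1-o) = o by omega]; exact ho
    · rw [pvW_revTake l c (c-1-o) (by omega) (by omega), show c - (c-1-o) = o + 1 by omega]
      omega
    · intro m hm
      rw [pvW_revTake l c m (by omega) (by omega)]
      by_cases hm0 : m = 0
      · subst hm0; simp
      · have := hA (c - m) (by omega) (by omega)
        omega

theorem pvMatched_unique_o (l : List Char) (o o' c : Nat)
    (h1 : pvMatched l o c) (h2 : pvMatched l o' c) : o = o' := by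
  obtain ⟨ho1, hc1, _, _, hE1, hA1⟩ := h1
  obtain ⟨ho2, hc2, _, _, hE2, hA2⟩ := h2
  rcases lt_trichotomy o o' with h | h | h
  · have := hA1 o' (by omega) (by omega); omega
  · exact h
  · have := hA2 o (by omega) (by omega); omega


def pvGoodStack (l : List Char) (k : Nat) (stN : List Nat) : Prop :=
  (∀ i (h : i < stN.length), stN[i] < k ∧ l[stN[i]]? = some '(' ∧ pvB l (stN[i]) = (i : Int) ∧
      ∀ j : Nat, stN[i] < j → j ≤ k → (i : Int) + 1 ≤ pvB l j)
  ∧ pvB l k = stN.length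

def pvGoodBP (l : List Char) (k : Nat) (bp : PySem.Dict Int Int) : Prop :=
  (∀ o c : Nat, pvMatched l o c → c < k → bp.get? (o : Int) = some (c : Int) ∧ bp.get? (c : Int) = some (o : Int))
  ∧ (∀ x : Int, bp.get? x ≠ none → ∃ o c : Nat, pvMatched l o c ∧ c < k ∧ (x = (o : Int) ∨ x = (c : Int)))

def pvGoodCover (l : List Char) (k : Nat) (stN : List Nat) : Prop :=
  (∀ o : Nat, o < k → l[o]? = some '(' → (o ∈ stN ∨ ∃ c, pvMatched l o c ∧ c < k))
  ∧ (∀ c : Nat, c < k → l[c]? = some ')' → ∃ o, pvMatched l o c ∧ c < k + 1)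

theorem pvRun (l : List Char) (hBal : ∀ k, k ≤ l.length → 0 ≤ pvB l k) :
    ∀ (t : List Char) (k : Nat) (stN : List Nat) (bp : PySem.Dict Int Int),
      l.drop k = t → k ≤ l.length →
      pvGoodStack l k stN → pvGoodBP l k bp → pvGoodCover l k stN →
      ∃ stN' bp',
        (PySem.List.enumerate t (k : Int)).foldl pvStepBP
            (some (List.map (fun m : Nat => (m : Int)) stN, bp))
          = some (List.map (fun m : Nat => (m : Int)) stN', bp') ∧
        pvGoodStack l l.length stN' ∧ pvGoodBP l l.length bp' ∧ pvGoodCover l l.length stN' := by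
  intro t
  induction t with
  | nil =>
    intro k stN bp hdrop hk h1 h2 h3
    have hlen : k = l.length := by
      have := congrArg List.length hdrop; simp at this; omega
    subst hlen
    exact ⟨stN, bp, by simp [PySem.List.enumerate_nil], h1, h2, h3⟩
  | cons c t' ih =>
    intro k stN bp hdrop hk h1 h2 h3
    have hkl : k < l.length := by
      have := congrArg List.length hdrop; simp at this; omega
    have hlk : l[k]? = some c := by
      have h0 : (l.drop k)[0]? = some c := by rw [hdrop]; rfl
      rwa [List.getElem?_drop, Nat.add_zero] at h0
    have hdrop' : l.drop (k+1) = t' := by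
      have h0 : (l.drop k).tail = t' := by rw [hdrop]; rfl
      rwa [List.tail_drop] at h0
    rw [PySem.List.enumerate_cons, List.foldl_cons,
      show (k : Int) + 1 = ((k+1 : Nat) : Int) by push_cast; ring]
    by_cases hc : c = '('
    · -- push
      subst hc
      have hB1 : pvB l (k+1) = pvB l k + 1 := by
        have := pvB_succ l k '(' hlk; simpa using this
      have hstep : pvStepBP (some (List.map (fun m : Nat => (m : Int)) stN, bp)) ((k : Int), '(')
          = some (List.map (fun m : Nat => (m : Int)) (stN ++ [k]), bp) := by
        simp [pvStepBP]
      rw [hstep]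
      refine ih (k+1) (stN ++ [k]) bp hdrop' (by omega) ⟨?_, ?_⟩ ⟨?_, ?_⟩ ⟨?_, ?_⟩
      · intro i hi
        simp only [List.length_append, List.length_cons, List.length_nil] at hi
        by_cases hi' : i < stN.length
        · rw [List.getElem_append_left hi']
          obtain ⟨p1, p2, p3, p4⟩ := h1.1 i hi'
          refine ⟨by omega, p2, p3, ?_⟩
          intro j hj1 hj2
          rcases Nat.lt_or_ge j (k+1) with h | h
          · exact p4 j hj1 (by omega)
          · have : j = k+1 := by omega
            subst this
            have := h1.2; omega
        · have hieq : i = stN.length := by omega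
          subst hieq
          rw [List.getElem_concat_length]
          refine ⟨by omega, hlk, by simpa using h1.2, ?_⟩
          intro j hj1 hj2
          have : j = k+1 := by omega
          subst this; rw [hB1, h1.2]; push_cast; omega
      · simp only [List.length_append, List.length_cons, List.length_nil]
        rw [hB1, h1.2]; push_cast; omega
      · intro o' c' hM hc'
        rcases Nat.lt_or_ge c' k with h | h
        · exact h2.1 o' c' hM h
        · have : c' = k := by omega
          subst this
          rw [hM.2.2.2.1] at hlk; simp at hlk
      · intro x hx
        obtain ⟨o', c', hM, hc', hrole⟩ := h2.2 x hx
        exact ⟨o', c', hM, by omega, hrole⟩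
      · intro o' ho' hchar
        rcases Nat.lt_or_ge o' k with h | h
        · rcases h3.1 o' h hchar with hmem | ⟨c', hM, hc'⟩
          · exact Or.inl (List.mem_append_left _ hmem)
          · exact Or.inr ⟨c', hM, by omega⟩
        · have : o' = k := by omega
          subst this
          exact Or.inl (List.mem_append_right _ (by simp))
      · intro c' hc' hchar
        rcases Nat.lt_or_ge c' k with h | h
        · obtain ⟨o', hM, _⟩ := h3.2 c' h hchar
          exact ⟨o', hM, by omega⟩
        · have : c' = k := by omega
          subst this; rw [hchar] at hlk; simp at hlk
    · by_cases hc2 : c = ')'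
      · -- pop
        subst hc2
        have hB1 : pvB l (k+1) = pvB l k - 1 := by
          have := pvB_succ l k ')' hlk; simp at this; omega
        have hpos : 0 ≤ pvB l (k+1) := hBal (k+1) (by omega)
        have hm1 : 1 ≤ stN.length := by
          have := h1.2; omega
        have hne : stN ≠ [] := by
          intro h; subst h; simp at hm1
        obtain ⟨sd, o, rfl⟩ : ∃ sd o, stN = sd ++ [o] :=
          ⟨stN.dropLast, stN.getLast hne, (List.dropLast_append_getLast hne).symm⟩
        have hgl : (List.map (fun m : Nat => (m : Int)) (sd ++ [o])).getLast? = some (o : Int) := by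
          rw [List.map_append]; simp
        obtain ⟨po1, po2, po3, po4⟩ := h1.1 sd.length (by simp)
        simp only [List.getElem_concat_length] at po1 po2 po3 po4
        have hlen2 : pvB l k = (sd.length : Int) + 1 := by
          have := h1.2; simp at this; push_cast at this ⊢; omega
        have hMok : pvMatched l o k :=
          ⟨po1, hkl, po2, hlk, by omega, fun j hj1 hj2 => by
            have := po4 j hj1 hj2; omega⟩
        have hfresh : ∀ o' c', pvMatched l o' c' → c' < k → o' ≠ o ∧ c' ≠ o := by
          intro o' c' hM hck
          constructor
          · intro he; subst he
            have h01 := hM.1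
            have h5 := hM.2.2.2.2.1
            have := po4 (c'+1) (by omega) (by omega)
            omega
          · intro he; subst he
            rw [hM.2.2.2.1] at po2; simp at po2
        have hstep : pvStepBP (some (List.map (fun m : Nat => (m : Int)) (sd ++ [o]), bp)) ((k : Int), ')')
            = some (List.map (fun m : Nat => (m : Int)) sd,
                (bp.insert (o : Int) (k : Int)).insert (k : Int) (o : Int)) := by
          simp only [pvStepBP, reduceIte]
          rw [hgl]
          simp [List.map_append]
        rw [hstep]
        have honek : o ≠ k := by omega
        refine ih (k+1) sd ((bp.insert (o : Int) (k : Int)).insert (k : Int) (o : Int))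
          hdrop' (by omega) ⟨?_, ?_⟩ ⟨?_, ?_⟩ ⟨?_, ?_⟩
        · intro i hi
          have hisd : i < (sd ++ [o]).length := by simp; omega
          have hgei : (sd ++ [o])[i] = sd[i] := List.getElem_append_left hi
          obtain ⟨p1, p2, p3, p4⟩ := h1.1 i hisd
          rw [hgei] at p1 p2 p3 p4
          refine ⟨by omega, p2, p3, ?_⟩
          intro j hj1 hj2
          rcases Nat.lt_or_ge j (k+1) with h | h
          · exact p4 j hj1 (by omega)
          · have : j = k+1 := by omega
            subst this
            rw [hB1, hlen2]; push_cast; omega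
        · rw [hB1, hlen2]; push_cast; omega
        · intro o' c' hM hc'
          rcases Nat.lt_or_ge c' k with h | h
          · obtain ⟨g1, g2⟩ := h2.1 o' c' hM h
            obtain ⟨f1, f2⟩ := hfresh o' c' hM h
            have ho'k : o' ≠ k := by have := hM.1; omega
            have hc'k : c' ≠ k := by omega
            rw [PySem.Dict.get?_insert_of_ne _ _ (by exact_mod_cast ho'k),
              PySem.Dict.get?_insert_of_ne _ _ (by exact_mod_cast f1),
              PySem.Dict.get?_insert_of_ne _ _ (by exact_mod_cast hc'k),
              PySem.Dict.get?_insert_of_ne _ _ (by exact_mod_cast f2)]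
            exact ⟨g1, g2⟩
          · have hceq : c' = k := by omega
            rw [hceq] at hM ⊢
            have hoo : o' = o := pvMatched_unique_o l o' o k hM hMok
            rw [hoo]
            constructor
            · rw [PySem.Dict.get?_insert_of_ne _ _ (by exact_mod_cast honek),
                PySem.Dict.get?_insert_self]
            · rw [PySem.Dict.get?_insert_self]
        · intro x hx
          by_cases hxk : x = (k : Int)
          · exact ⟨o, k, hMok, by omega, Or.inr hxk⟩
          · by_cases hxo : x = (o : Int)
            · exact ⟨o, k, hMok, by omega, Or.inl hxo⟩
            · rw [PySem.Dict.get?_insert_of_ne _ _ hxk,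
                PySem.Dict.get?_insert_of_ne _ _ hxo] at hx
              obtain ⟨o', c', hM, hc', hrole⟩ := h2.2 x hx
              exact ⟨o', c', hM, by omega, hrole⟩
        · intro o' ho' hchar
          rcases Nat.lt_or_ge o' k with h | h
          · rcases h3.1 o' h hchar with hmem | ⟨c', hM, hc'⟩
            · rcases List.mem_append.mp hmem with hin | hin
              · exact Or.inl hin
              · have : o' = o := by simpa using hin
                subst this
                exact Or.inr ⟨k, hMok, by omega⟩
            · exact Or.inr ⟨c', hM, by omega⟩
          · have : o' = k := by omega
            subst this; rw [hchar] at hlk; simp at hlk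
        · intro c' hc' hchar
          rcases Nat.lt_or_ge c' k with h | h
          · obtain ⟨o', hM, _⟩ := h3.2 c' h hchar
            exact ⟨o', hM, by omega⟩
          · have : c' = k := by omega
            subst this
            exact ⟨o, hMok, by omega⟩
      · -- neutral
        have hB1 : pvB l (k+1) = pvB l k := by
          have := pvB_succ l k c hlk
          rw [if_neg hc, if_neg hc2] at this; omega
        have hstep : pvStepBP (some (List.map (fun m : Nat => (m : Int)) stN, bp)) ((k : Int), c)
            = some (List.map (fun m : Nat => (m : Int)) stN, bp) := by
          simp [pvStepBP, hc, hc2]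
        rw [hstep]
        refine ih (k+1) stN bp hdrop' (by omega) ⟨?_, ?_⟩ ⟨?_, ?_⟩ ⟨?_, ?_⟩
        · intro i hi
          obtain ⟨p1, p2, p3, p4⟩ := h1.1 i hi
          refine ⟨by omega, p2, p3, ?_⟩
          intro j hj1 hj2
          rcases Nat.lt_or_ge j (k+1) with h | h
          · exact p4 j hj1 (by omega)
          · have : j = k+1 := by omega
            subst this
            have := p4 k ?_ (le_refl k)
            · omega
            · omega
        · rw [hB1]; exact h1.2
        · intro o' c' hM hc'
          rcases Nat.lt_or_ge c' k with h | h
          · exact h2.1 o' c' hM h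
          · have : c' = k := by omega
            subst this
            rw [hM.2.2.2.1] at hlk; simp at hlk
            exact absurd hlk.symm hc2
        · intro x hx
          obtain ⟨o', c', hM, hc', hrole⟩ := h2.2 x hx
          exact ⟨o', c', hM, by omega, hrole⟩
        · intro o' ho' hchar
          rcases Nat.lt_or_ge o' k with h | h
          · rcases h3.1 o' h hchar with hmem | ⟨c', hM, hc'⟩
            · exact Or.inl hmem
            · exact Or.inr ⟨c', hM, by omega⟩
          · have : o' = k := by omega
            subst this; rw [hchar] at hlk; simp at hlk
            exact absurd hlk.symm hc
        · intro c' hc' hchar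
          rcases Nat.lt_or_ge c' k with h | h
          · obtain ⟨o', hM, _⟩ := h3.2 c' h hchar
            exact ⟨o', hM, by omega⟩
          · have : c' = k := by omega
            subst this; rw [hchar] at hlk; simp at hlk
            exact absurd hlk.symm hc2

theorem pvRun_full (l : List Char) (hBal : ∀ k, k ≤ l.length → 0 ≤ pvB l k) :
    ∃ stN' bp',
      (PySem.List.enumerate l 0).foldl pvStepBP (some ([], PySem.Dict.empty))
        = some (List.map (fun m : Nat => (m : Int)) stN', bp') ∧
      (∀ x : Int, bp'.get? x = pvPartner l x) := by
  obtain ⟨stN', bp', hfold, hgs, hgb, hgc⟩ :=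
    pvRun l hBal l 0 [] PySem.Dict.empty rfl (by omega)
      ⟨by intro i hi; simp at hi, by simp [pvB_zero]⟩
      ⟨by intro o c hM hc; omega, by intro x hx; simp [PySem.Dict.get?_empty] at hx⟩
      ⟨by intro o ho; omega, by intro c hc; omega⟩
  refine ⟨stN', bp', by simpa using hfold, ?_⟩
  intro x
  by_cases hx0 : x < 0 ∨ (l.length : Int) ≤ x
  · have hp : pvPartner l x = none := by unfold pvPartner; rw [if_pos hx0]
    rw [hp]
    cases hq : bp'.get? x with
    | none => rfl
    | some q =>
      obtain ⟨o, c, hM, hc, hrole⟩ := hgb.2 x (by rw [hq]; simp)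
      have hc2 := hM.2.1
      have ho2 := hM.1
      rcases hrole with rfl | rfl <;> [skip; skip] <;>
        · exfalso; rcases hx0 with h | h <;> [omega; ·push_cast at h; omega]
  · have hx1 : 0 ≤ x ∧ x < (l.length : Int) := by omega
    have hm : ((x.toNat : Nat) : Int) = x := Int.toNat_of_nonneg hx1.1
    set m := x.toNat with hmdef
    have hml : m < l.length := by omega
    have hch : l[m]? = some l[m] := List.getElem?_eq_getElem hml
    rw [← hm]
    by_cases hop : l[m] = '('
    · rw [hop] at hch
      rcases hgc.1 m hml hch with hmem | ⟨c, hM, hcn⟩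
      · obtain ⟨i, hilt, hie⟩ := List.mem_iff_getElem.mp hmem
        obtain ⟨p1, p2, p3, p4⟩ := hgs.1 i hilt
        rw [hie] at p3 p4
        have hpnone : pvPartner l (m : Int) = none := by
          cases hp : pvPartner l (m : Int) with
          | none => rfl
          | some r =>
            obtain ⟨c, rfl, hM⟩ := (pvPartner_open_iff l m hch r).mp hp
            have h1c := hM.1
            have h2c := hM.2.1
            have hE := hM.2.2.2.2.1
            have := p4 (c+1) (by omega) (by omega)
            omega
        have hbnone : bp'.get? (m : Int) = none := by
          cases hq : bp'.get? (m : Int) with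
          | none => rfl
          | some q =>
            obtain ⟨o', c', hM, hc', hrole⟩ := hgb.2 _ (by rw [hq]; simp)
            rcases hrole with he | he
            · have ho'm : o' = m := by exact_mod_cast he.symm
              rw [ho'm] at hM
              have h1c := hM.1
              have h2c := hM.2.1
              have hE := hM.2.2.2.2.1
              have := p4 (c'+1) (by omega) (by omega)
              omega
            · have hc'm : c' = m := by exact_mod_cast he.symm
              rw [hc'm] at hM
              have := hM.2.2.2.1
              rw [hch] at this; simp at this
        rw [hbnone, hpnone]
      · have hfound := (hgb.1 m c hM hM.2.1).1
        have hpart : pvPartner l (m : Int) = some (c : Int) :=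
          (pvPartner_open_iff l m hch (c : Int)).mpr ⟨c, rfl, hM⟩
        rw [hfound, hpart]
    · by_cases hcl2 : l[m] = ')'
      · rw [hcl2] at hch
        obtain ⟨o, hM, _⟩ := hgc.2 m hml hch
        have hfound := (hgb.1 o m hM hml).2
        have hpart : pvPartner l (m : Int) = some (o : Int) :=
          (pvPartner_close_iff l m hch (o : Int)).mpr ⟨o, rfl, hM⟩
        rw [hfound, hpart]
      · have hpnone : pvPartner l (m : Int) = none := by
          unfold pvPartner
          rw [if_neg (by push_cast; omega)]
          simp only [Int.toNat_natCast]
          rw [hch]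
          simp [hop, hcl2]
        have hbnone : bp'.get? (m : Int) = none := by
          cases hq : bp'.get? (m : Int) with
          | none => rfl
          | some q =>
            obtain ⟨o', c', hM, hc', hrole⟩ := hgb.2 _ (by rw [hq]; simp)
            rcases hrole with he | he
            · have ho'm : o' = m := by exact_mod_cast he.symm
              rw [ho'm] at hM
              have := hM.2.2.1
              rw [hch] at this; simp at this
              exact absurd this hop
            · have hc'm : c' = m := by exact_mod_cast he.symm
              rw [hc'm] at hM
              have := hM.2.2.2.1
              rw [hch] at this; simp at this
              exact absurd this hcl2
        rw [hbnone, hpnone]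

theorem pvFold_congr (l : List Char) (bp : PySem.Dict Int Int)
    (pairs : PySem.Dict String String) (hpt : ∀ x, bp.get? x = pvPartner l x) :
    ∀ (L : List (Int × String)) (acc : Option (PySem.Dict Int String)),
      L.foldl (pvPropA bp pairs) acc = L.foldl (pvPropB l pairs) acc := by
  intro L
  induction L with
  | nil => intro acc; rfl
  | cons kv L ih =>
    intro acc
    rw [List.foldl_cons, List.foldl_cons, show pvPropA bp pairs acc kv = pvPropB l pairs acc kv by
      unfold pvPropA pvPropB; rw [hpt kv.1], ih]

-- ===== VERDICT (by name: the statement is the Claim_ definition above) =====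
theorem check_sequence_constraints_spec : Claim_equal_check_sequence_constraints := by
  unfold Claim_equal_check_sequence_constraints
  intro structure_ constraints _ hPre
  unfold Spec_check_sequence_constraints
  have hBal : ∀ k, k ≤ structure_.toList.length → 0 ≤ pvB structure_.toList k := by
    intro k hk
    have := hPre.1 k hk
    unfold pvB pvW
    omega
  obtain ⟨stN', bp', hfold, hpt⟩ := pvRun_full structure_.toList hBal
  unfold check_sequence_constraints check_sequence_constraints_alt structure_to_bp
  rw [hfold]
  simp only [Option.map_some]
  rw [pvFold_congr structure_.toList bp' _ hpt]
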